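-- pv_equiv track=rewrite | github.com/MrBrantCode/unitest_baseline | mut_generate/mist_train_cf/cf_55834/solution.py | reverse_consonant_number
-- ===== SOURCE A (Python) =====
-- def reverse_consonant_number(s):
--     consonants = "bcdfghjklmnpqrstvwxyz"
--     consonants += consonants.upper()
--     numbers = "0123456789"
--
--     stack = [ch for ch in s if ch in consonants or ch in numbers]
--     output = ""
--     for ch in s:
--         if ch in consonants or ch in numbers:
--             output += stack.pop()
--         else:
--             output += ch
--     return output
-- ===== SOURCE B (Python) =====
-- def reverse_consonant_number(s):
--     targets = set("bcdfghjklmnpqrstvwxyzBCDFGHJKLMNPQRSTVWXYZ0123456789")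
--     chars = list(s)
--     i, j = 0, len(chars) - 1
--     while i < j:
--         if chars[i] not in targets:
--             i += 1
--         elif chars[j] not in targets:
--             j -= 1
--         else:
--             chars[i], chars[j] = chars[j], chars[i]
--             i += 1
--             j -= 1
--     return ''.join(chars)
-- ===== Notes on version B (the rewrite author's own statement) =====
-- stated objective: faster
-- what changed: Replaces A's filter-then-rebuild pass (a stack of targets popped while concatenating onto an immutable string, with repeated linear membership scans of the consonant string) by an in-place two-pointer swap over a char list with an O(1) set membership test.
import Mathlib
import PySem

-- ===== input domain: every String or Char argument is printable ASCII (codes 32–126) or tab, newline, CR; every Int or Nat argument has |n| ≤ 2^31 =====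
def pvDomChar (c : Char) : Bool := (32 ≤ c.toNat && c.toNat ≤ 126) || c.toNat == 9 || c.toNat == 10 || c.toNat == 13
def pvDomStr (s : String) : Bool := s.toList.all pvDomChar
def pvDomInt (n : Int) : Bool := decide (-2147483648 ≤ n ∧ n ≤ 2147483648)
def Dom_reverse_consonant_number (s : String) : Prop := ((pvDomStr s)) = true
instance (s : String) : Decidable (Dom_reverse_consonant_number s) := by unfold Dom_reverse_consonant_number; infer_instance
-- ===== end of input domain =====

-- B replaces A's stack-and-rebuild pass by an in-place two-pointer swap over a char list
-- with a set membership test (return value equivalent; neither mutates its argument).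


-- ===== PORT A =====
-- consonants = "bcdf…" + its upper case; numbers = "0123456789"
def pvConsStr : String := "bcdfghjklmnpqrstvwxyzBCDFGHJKLMNPQRSTVWXYZ"
def pvNumStr : String := "0123456789"
-- `ch in consonants or ch in numbers` (membership of a char in a string literal, exact)
def pvIsTgtA (c : Char) : Bool := pvConsStr.toList.contains c || pvNumStr.toList.contains c

-- the `for ch in s` loop: output accumulator and the stack, popped from the end
def pvLoopA : List Char → List Char → List Char → List Char
  | [], _, out => out
  | ch :: rest, stack, out =>
    if pvIsTgtA ch then
      match PySem.List.pop? stack (-1) with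
      | some (x, st') => pvLoopA rest st' (out ++ [x])
      | none => pvLoopA rest stack out  -- dead branch: the stack holds one entry per target char of s, so pop never fails
    else pvLoopA rest stack (out ++ [ch])

def reverse_consonant_number (s : String) : String :=
  let stack := s.toList.filter pvIsTgtA
  String.mk (pvLoopA s.toList stack [])

-- ===== PORT B =====
-- targets = set("bcdf…BCDF…0123456789"); membership in this literal set of distinct chars is exact as list containment
def pvTgtStr : String := "bcdfghjklmnpqrstvwxyzBCDFGHJKLMNPQRSTVWXYZ0123456789"
def pvIsTgtB (c : Char) : Bool := pvTgtStr.toList.contains c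

-- the `while i < j` two-pointer loop over the mutable char list
def pvTpLoop (l : List Char) (i j : Nat) : List Char :=
  if _h : i < j then
    if ¬ pvIsTgtB (l.getD i ' ') then pvTpLoop l (i + 1) j
    else if ¬ pvIsTgtB (l.getD j ' ') then pvTpLoop l i (j - 1)
    else pvTpLoop ((l.set i (l.getD j ' ')).set j (l.getD i ' ')) (i + 1) (j - 1)
  else l
termination_by j - i
decreasing_by all_goals omega

def reverse_consonant_number_alt (s : String) : String :=
  String.mk (pvTpLoop s.toList 0 (s.toList.length - 1))

-- ===== PRECONDITION & SPEC =====
def Spec_reverse_consonant_number (s : String) (out : String) : Prop := out = reverse_consonant_number_alt s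
instance (s : String) (out : String) : Decidable (Spec_reverse_consonant_number s out) := by unfold Spec_reverse_consonant_number; infer_instance

-- ===== CLAIM (what is proved, stated in full; the proofs are below) =====
def Claim_equal_reverse_consonant_number : Prop := ∀ (s : String), Dom_reverse_consonant_number s → Spec_reverse_consonant_number s (reverse_consonant_number s)

-- ===== LEMMAS AND PROOFS =====

-- the two target tests agree
theorem pvTgt_eq (c : Char) : pvIsTgtA c = pvIsTgtB c := by
  have h : pvTgtStr.toList = pvConsStr.toList ++ pvNumStr.toList := by decide
  simp only [pvIsTgtA, pvIsTgtB, h]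
  induction pvConsStr.toList with
  | nil => simp
  | cons x xs ih => simp [List.contains_cons, ih, Bool.or_assoc]

-- canonical form: rewrite xs, replacing its target chars in order by the replacement list r
def pvMask : List Char → List Char → List Char
  | [], _ => []
  | c :: cs, r =>
    if pvIsTgtB c then
      match r with
      | x :: r' => x :: pvMask cs r'
      | [] => c :: pvMask cs []
    else c :: pvMask cs r

def pvCanon (xs : List Char) : List Char := pvMask xs ((xs.filter pvIsTgtB).reverse)

theorem pvMask_append (xs ys r1 r2 : List Char)
    (h : r1.length = (xs.filter pvIsTgtB).length) :
    pvMask (xs ++ ys) (r1 ++ r2) = pvMask xs r1 ++ pvMask ys r2 := by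
  induction xs generalizing r1 with
  | nil =>
    simp at h
    simp [h, pvMask]
  | cons c cs ih =>
    by_cases hc : pvIsTgtB c
    · simp [hc] at h
      match r1, h with
      | x :: r1', h =>
        simp [pvMask, hc, ih r1' (by simpa using h)]
    · simp [hc] at h
      simp [pvMask, hc, ih r1 h]

theorem pvCanon_cons_not (c : Char) (xs : List Char) (hc : pvIsTgtB c = false) :
    pvCanon (c :: xs) = c :: pvCanon xs := by
  simp [pvCanon, List.filter_cons, hc, pvMask]

theorem pvCanon_snoc_not (xs : List Char) (d : Char) (hd : pvIsTgtB d = false) :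
    pvCanon (xs ++ [d]) = pvCanon xs ++ [d] := by
  have hf : (xs ++ [d]).filter pvIsTgtB = xs.filter pvIsTgtB := by
    simp [List.filter_append, hd]
  have := pvMask_append xs [d] ((xs.filter pvIsTgtB).reverse) []
    (by simp)
  simp only [List.append_nil] at this
  simp [pvCanon, hf, this, pvMask, hd]

theorem pvCanon_both (c d : Char) (m : List Char)
    (hc : pvIsTgtB c = true) (hd : pvIsTgtB d = true) :
    pvCanon (c :: (m ++ [d])) = d :: (pvCanon m ++ [c]) := by
  have hf : (c :: (m ++ [d])).filter pvIsTgtB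
      = c :: (m.filter pvIsTgtB ++ [d]) := by
    simp [List.filter_cons, List.filter_append, hc, hd]
  have hm := pvMask_append m [d] ((m.filter pvIsTgtB).reverse) [c] (by simp)
  simp [pvCanon, hf, pvMask, hc, hm, hd]

theorem pvCanon_short (xs : List Char) (h : xs.length ≤ 1) : pvCanon xs = xs := by
  match xs, h with
  | [], _ => rfl
  | [c], _ =>
    by_cases hc : pvIsTgtB c <;> simp [pvCanon, List.filter_cons, hc, pvMask]

-- A's loop consumes the reversed stack in order
theorem pvLoopA_eq (xs : List Char) : ∀ (r out : List Char),
    r.length = (xs.filter pvIsTgtB).length →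
    pvLoopA xs r.reverse out = out ++ pvMask xs r := by
  induction xs with
  | nil => intro r out _; simp [pvLoopA, pvMask]
  | cons c cs ih =>
    intro r out h
    by_cases hc : pvIsTgtB c
    · simp [List.filter_cons, hc] at h
      match r, h with
      | x :: r', h =>
        have hpop : PySem.List.pop? (r'.reverse ++ [x]) (-1) = some (x, r'.reverse) :=
          PySem.List.pop?_last r'.reverse x
        simp only [pvLoopA, pvTgt_eq, hc, if_pos, List.reverse_cons, hpop]
        rw [ih r' (out ++ [x]) (by simpa using h)]
        simp [pvMask, hc]
    · simp [List.filter_cons, hc] at h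
      simp only [pvLoopA, pvTgt_eq, hc]
      rw [if_neg (by simp), ih r (out ++ [c]) h]
      simp [pvMask, hc]

theorem portA_canon (s : String) :
    reverse_consonant_number s = String.mk (pvCanon s.toList) := by
  unfold reverse_consonant_number
  have hfa : s.toList.filter pvIsTgtA = s.toList.filter pvIsTgtB := by
    apply List.filter_congr; intro c _; rw [pvTgt_eq]
  have := pvLoopA_eq s.toList ((s.toList.filter pvIsTgtB).reverse) [] (by simp)
  simp only [List.reverse_reverse] at this
  simp [hfa, this, pvCanon]

-- positional helpers for the two-pointer proof
theorem pvGetD_append_length (pre t : List Char) (c d : Char) :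
    (pre ++ c :: t).getD pre.length d = c := by
  induction pre with
  | nil => rfl
  | cons p ps ih => simpa using ih

theorem pvSet_append_length (pre t : List Char) (c x : Char) :
    (pre ++ c :: t).set pre.length x = pre ++ x :: t := by
  induction pre with
  | nil => rfl
  | cons p ps ih => simpa using ih

-- B's two-pointer loop computes the canonical form on the window
theorem pvTpLoop_eq : ∀ (n : ℕ) (mid pre suf : List Char), mid.length ≤ n →
    pvTpLoop (pre ++ (mid ++ suf)) pre.length (pre.length + mid.length - 1)
      = pre ++ (pvCanon mid ++ suf) := by
  intro n
  induction n with
  | zero =>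
    intro mid pre suf h
    have : mid = [] := List.eq_nil_of_length_eq_zero (Nat.le_zero.mp h)
    subst this
    rw [pvTpLoop]
    simp [pvCanon, pvMask]
  | succ n ih =>
    intro mid pre suf h
    by_cases hij : pre.length < pre.length + mid.length - 1
    · -- mid.length ≥ 2 : mid = c :: (m ++ [d])
      have hlen : 2 ≤ mid.length := by omega
      obtain ⟨c, rest, rfl⟩ : ∃ c rest, mid = c :: rest := by
        match mid, hlen with | c :: rest, _ => exact ⟨c, rest, rfl⟩
      have hrest : rest ≠ [] := by
        intro hr; rw [hr] at hlen; simp at hlen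
      obtain ⟨m, d, rfl⟩ : ∃ m d, rest = m ++ [d] := by
        rcases List.eq_nil_or_concat rest with h0 | ⟨m, d, hmd⟩
        · exact absurd h0 hrest
        · exact ⟨m, d, by simpa [List.concat_eq_append] using hmd⟩
      have hflat : pre ++ ((c :: (m ++ [d])) ++ suf) = pre ++ c :: (m ++ d :: suf) := by
        simp
      have hgi : (pre ++ c :: (m ++ d :: suf)).getD pre.length ' ' = c :=
        pvGetD_append_length pre (m ++ d :: suf) c ' '
      have hj : pre.length + (c :: (m ++ [d])).length - 1 = (pre ++ c :: m).length := by
        simp <;> omega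
      have hgj : (pre ++ c :: (m ++ d :: suf)).getD ((pre ++ c :: m).length) ' ' = d := by
        have : pre ++ c :: (m ++ d :: suf) = (pre ++ c :: m) ++ d :: suf := by simp
        rw [this]; exact pvGetD_append_length _ suf d ' '
      rw [pvTpLoop]
      rw [dif_pos hij]
      rw [hflat, hj, hgi, hgj]
      by_cases hc : pvIsTgtB c
      · by_cases hd : pvIsTgtB d
        · -- swap both ends
          rw [if_neg (by simp [hc]), if_neg (by simp [hd])]
          have hset1 : (pre ++ c :: (m ++ d :: suf)).set pre.length d
              = pre ++ d :: (m ++ d :: suf) := pvSet_append_length _ _ _ _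
          have hset2 : (pre ++ d :: (m ++ d :: suf)).set ((pre ++ c :: m).length) c
              = (pre ++ d :: m) ++ c :: suf := by
            have e1 : pre ++ d :: (m ++ d :: suf) = (pre ++ d :: m) ++ d :: suf := by simp
            have e2 : (pre ++ c :: m).length = (pre ++ d :: m).length := by simp
            rw [e1, e2]; exact pvSet_append_length _ _ _ _
          rw [hset1, hset2]
          have harr : (pre ++ d :: m) ++ c :: suf = (pre ++ [d]) ++ (m ++ (c :: suf)) := by simp
          have hi' : pre.length + 1 = (pre ++ [d]).length := by simp
          have hj' : (pre ++ c :: m).length - 1 = (pre ++ [d]).length + m.length - 1 := by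
            simp <;> omega
          rw [harr, hi', hj']
          rw [ih m (pre ++ [d]) (c :: suf) (by simp at h ⊢ <;> omega)]
          rw [pvCanon_both c d m hc hd]
          simp
        · -- right end not a target: shrink j
          rw [if_neg (by simp [hc]), if_pos (by simp [hd])]
          have harr : pre ++ c :: (m ++ d :: suf) = pre ++ ((c :: m) ++ (d :: suf)) := by simp
          have hj' : (pre ++ c :: m).length - 1 = pre.length + (c :: m).length - 1 := by simp
          rw [harr, hj']
          rw [ih (c :: m) pre (d :: suf) (by simp at h ⊢ <;> omega)]
          have hcm : c :: (m ++ [d]) = (c :: m) ++ [d] := by simp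
          rw [hcm, pvCanon_snoc_not (c :: m) d (by simpa using hd)]
          simp
      · -- left end not a target: advance i
        rw [if_pos (by simp [hc])]
        have harr : pre ++ c :: (m ++ d :: suf) = (pre ++ [c]) ++ ((m ++ [d]) ++ suf) := by simp
        have hi' : pre.length + 1 = (pre ++ [c]).length := by simp
        have hj' : (pre ++ c :: m).length = (pre ++ [c]).length + (m ++ [d]).length - 1 := by
          simp <;> omega
        rw [harr, hi', hj']
        rw [ih (m ++ [d]) (pre ++ [c]) suf (by simp at h ⊢ <;> omega)]
        rw [pvCanon_cons_not c (m ++ [d]) (by simpa using hc)]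
        simp
    · -- window of length ≤ 1: loop exits
      rw [pvTpLoop]
      rw [dif_neg hij]
      rw [pvCanon_short mid (by omega)]

theorem portB_canon (s : String) :
    reverse_consonant_number_alt s = String.mk (pvCanon s.toList) := by
  unfold reverse_consonant_number_alt
  have := pvTpLoop_eq s.toList.length s.toList [] [] s.toList.length.le_refl
  simp only [List.append_nil, List.nil_append, List.length_nil, Nat.zero_add] at this
  rw [this]

-- ===== VERDICT (by name: the statement is the Claim_ definition above) =====
theorem reverse_consonant_number_spec : Claim_equal_reverse_consonant_number := by
  intro s _
  unfold Spec_reverse_consonant_number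
  rw [portA_canon, portB_canon]
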